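-- pv_equiv track=rewrite | github.com/Bartosz95/Masters-Thesis | test_TSR.py | check_detected_signs
-- ===== SOURCE A (Python) =====
-- def check_detected_signs(signs_on_image, signs_from_tsr):
--     count_of_misses = 0
--     count_of_bed_recognised_signs = 0
--     good_detected_signs = []
--     for sign_from_tsr in signs_from_tsr:
--         x_sign_tsr, y_sign_tsr, size_sign_tsr, percent_sign_tsr, type_sign_tsr = sign_from_tsr
--         miss = True
--         for sign_on_image in signs_on_image:
--             (x1, y1, x2, y2), type_sign, color_sign = sign_on_image
--             if (x_sign_tsr > x1) and (x_sign_tsr < x2) and (y_sign_tsr > y1) and (y_sign_tsr < y2):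
--                 miss = False
--                 if type_sign_tsr == type_sign:
--                     good_detected_signs.append(sign_from_tsr)
--                     break
--                 else:
--                     count_of_bed_recognised_signs += 1
--         if miss:
--             count_of_misses += 1
--
--     return good_detected_signs, count_of_misses, count_of_bed_recognised_signs
-- ===== SOURCE B (Python) =====
-- def _containing(signs_on_image, x, y):
--     """Rectangles that strictly contain the point (x, y), in image order."""
--     return [r for r in signs_on_image
--             if r[0][0] < x < r[0][2] and r[0][1] < y < r[0][3]]
--
--
-- def _misrecognitions(rects, sign_type):
--     """How many wrong-type rectangles come before the first right-type one."""
--     count = 0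
--     for _rect, rect_type, _color in rects:
--         if rect_type == sign_type:
--             break
--         count += 1
--     return count
--
--
-- def check_detected_signs(signs_on_image, signs_from_tsr):
--     good_detected_signs = []
--     count_of_misses = 0
--     count_of_bed_recognised_signs = 0
--     for sign in signs_from_tsr:
--         x, y, _size, _percent, sign_type = sign
--         containing = _containing(signs_on_image, x, y)
--         if not containing:
--             count_of_misses += 1
--         count_of_bed_recognised_signs += _misrecognitions(containing, sign_type)
--         if any(rect_type == sign_type for _rect, rect_type, _color in containing):
--             good_detected_signs.append(sign)
--     return good_detected_signs, count_of_misses, count_of_bed_recognised_signs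
-- ===== Notes on version B (the rewrite author's own statement) =====
-- stated objective: alternative
-- what changed: Replaces A's interleaved scan-mark-break inner loop with a filter-then-analyse decomposition: per tsr sign it builds the list of rectangles containing the point, counts a miss iff that list is empty, adds the number of wrong-type rectangles preceding the first right-type one, and appends the sign iff any containing rectangle has the matching type.
import Mathlib
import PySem

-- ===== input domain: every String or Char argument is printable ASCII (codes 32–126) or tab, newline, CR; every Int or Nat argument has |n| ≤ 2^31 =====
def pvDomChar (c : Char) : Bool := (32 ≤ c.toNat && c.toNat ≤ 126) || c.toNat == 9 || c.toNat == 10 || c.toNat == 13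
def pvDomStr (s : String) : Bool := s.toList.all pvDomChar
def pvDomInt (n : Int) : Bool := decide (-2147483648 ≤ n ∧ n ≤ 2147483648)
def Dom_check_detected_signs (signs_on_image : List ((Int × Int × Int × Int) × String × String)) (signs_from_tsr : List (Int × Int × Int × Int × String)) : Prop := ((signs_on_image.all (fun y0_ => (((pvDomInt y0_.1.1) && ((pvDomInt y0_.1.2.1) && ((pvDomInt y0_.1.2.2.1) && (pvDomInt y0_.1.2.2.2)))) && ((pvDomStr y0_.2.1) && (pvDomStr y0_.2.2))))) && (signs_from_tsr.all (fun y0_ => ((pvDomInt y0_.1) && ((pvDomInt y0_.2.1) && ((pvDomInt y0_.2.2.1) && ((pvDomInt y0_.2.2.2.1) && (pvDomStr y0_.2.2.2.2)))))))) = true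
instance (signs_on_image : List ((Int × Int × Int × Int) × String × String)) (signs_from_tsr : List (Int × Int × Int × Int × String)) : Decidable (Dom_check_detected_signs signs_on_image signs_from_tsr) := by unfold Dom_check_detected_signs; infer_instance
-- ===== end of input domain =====

-- B restructures A's interleaved scan-mark-break loop into a filter-then-analyse decomposition (objective: alternative, same cost).
-- ===== PORT A =====
-- inner for-loop of A over signs_on_image, carrying (miss, bed-count); returns (miss, bed-count, appended-to-good?)
def pvLoopA (x y : Int) (t : String) : List ((Int × Int × Int × Int) × String × String) → Bool → Int → Bool × Int × Bool
  | [], miss, bed => (miss, bed, false)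
  | r :: rs, miss, bed =>
    if decide (x > r.1.1) && decide (x < r.1.2.2.1) && decide (y > r.1.2.1) && decide (y < r.1.2.2.2) then
      if t == r.2.1 then (false, bed, true)
      else pvLoopA x y t rs false (bed + 1)
    else pvLoopA x y t rs miss bed

-- outer for-loop of A over signs_from_tsr, carrying (good, misses, bed-count)
def pvOuterA (img : List ((Int × Int × Int × Int) × String × String)) : List (Int × Int × Int × Int × String) → List (Int × Int × Int × Int × String) → Int → Int → (List (Int × Int × Int × Int × String)) × Int × Int
  | [], good, misses, bed => (good, misses, bed)
  | s :: rest, good, misses, bed =>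
    let (miss, bed', matched) := pvLoopA s.1 s.2.1 s.2.2.2.2 img true bed
    pvOuterA img rest (if matched then good ++ [s] else good) (if miss then misses + 1 else misses) bed'

def check_detected_signs (signs_on_image : List ((Int × Int × Int × Int) × String × String)) (signs_from_tsr : List (Int × Int × Int × Int × String)) : (List (Int × Int × Int × Int × String)) × Int × Int :=
  pvOuterA signs_on_image signs_from_tsr [] 0 0

-- ===== PORT B =====
-- Source B's _containing: the rectangles strictly containing (x, y), in image order
def pvContaining (img : List ((Int × Int × Int × Int) × String × String)) (x y : Int) : List ((Int × Int × Int × Int) × String × String) :=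
  img.filter (fun r => decide (r.1.1 < x) && decide (x < r.1.2.2.1) && decide (r.1.2.1 < y) && decide (y < r.1.2.2.2))

-- Source B's _misrecognitions: wrong-type rectangles before the first right-type one
def pvMisrec (t : String) : List ((Int × Int × Int × Int) × String × String) → Int
  | [] => 0
  | r :: rs => if r.2.1 == t then 0 else 1 + pvMisrec t rs

-- Source B's outer for-loop, same three accumulators
def pvOuterB (img : List ((Int × Int × Int × Int) × String × String)) : List (Int × Int × Int × Int × String) → List (Int × Int × Int × Int × String) → Int → Int → (List (Int × Int × Int × Int × String)) × Int × Int
  | [], good, misses, bed => (good, misses, bed)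
  | s :: rest, good, misses, bed =>
    let c := pvContaining img s.1 s.2.1
    pvOuterB img rest
      (if c.any (fun r => r.2.1 == s.2.2.2.2) then good ++ [s] else good)
      (if c.isEmpty then misses + 1 else misses)
      (bed + pvMisrec s.2.2.2.2 c)

def check_detected_signs_alt (signs_on_image : List ((Int × Int × Int × Int) × String × String)) (signs_from_tsr : List (Int × Int × Int × Int × String)) : (List (Int × Int × Int × Int × String)) × Int × Int :=
  pvOuterB signs_on_image signs_from_tsr [] 0 0

-- ===== PRECONDITION & SPEC =====
def Spec_check_detected_signs (signs_on_image : List ((Int × Int × Int × Int) × String × String)) (signs_from_tsr : List (Int × Int × Int × Int × String)) (out : (List (Int × Int × Int × Int × String)) × Int × Int) : Prop := out = check_detected_signs_alt signs_on_image signs_from_tsr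
instance (signs_on_image : List ((Int × Int × Int × Int) × String × String)) (signs_from_tsr : List (Int × Int × Int × Int × String)) (out : (List (Int × Int × Int × Int × String)) × Int × Int) : Decidable (Spec_check_detected_signs signs_on_image signs_from_tsr out) := by unfold Spec_check_detected_signs; infer_instance

-- ===== CLAIM (what is proved, stated in full; the proofs are below) =====
def Claim_equal_check_detected_signs : Prop := ∀ (signs_on_image : List ((Int × Int × Int × Int) × String × String)) (signs_from_tsr : List (Int × Int × Int × Int × String)), Dom_check_detected_signs signs_on_image signs_from_tsr → Spec_check_detected_signs signs_on_image signs_from_tsr (check_detected_signs signs_on_image signs_from_tsr)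

-- ===== LEMMAS AND PROOFS =====
theorem pvStr_beq_comm (a b : String) : (a == b) = (b == a) := by
  by_cases h : a = b
  · simp [h]
  · simp [h, Ne.symm h]

-- A's inner loop computes exactly B's three per-sign quantities over the containing list
theorem pvLoopA_eq (x y : Int) (t : String) (rs : List ((Int × Int × Int × Int) × String × String)) :
    ∀ (miss : Bool) (bed : Int),
    pvLoopA x y t rs miss bed =
      (miss && (pvContaining rs x y).isEmpty,
       bed + pvMisrec t (pvContaining rs x y),
       (pvContaining rs x y).any (fun r => r.2.1 == t)) := by
  induction rs with
  | nil => intro miss bed; simp [pvLoopA, pvContaining, pvMisrec]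
  | cons r rs ih =>
    intro miss bed
    by_cases hc : (decide (x > r.1.1) && decide (x < r.1.2.2.1) && decide (y > r.1.2.1) && decide (y < r.1.2.2.2)) = true
    · have hc' : (decide (r.1.1 < x) && decide (x < r.1.2.2.1) && decide (r.1.2.1 < y) && decide (y < r.1.2.2.2)) = true := by
        simpa [gt_iff_lt] using hc
      by_cases hm : (t == r.2.1) = true
      · have hm' : (r.2.1 == t) = true := by rw [pvStr_beq_comm]; exact hm
        simp [pvLoopA, hc, hm, pvContaining, pvMisrec, hm']
      · have hm' : (r.2.1 == t) = false := by
          rw [pvStr_beq_comm]; exact Bool.not_eq_true _ ▸ (by simpa using hm)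
        rw [pvLoopA]
        simp only [hc, if_true, hm, Bool.false_eq_true, if_false]
        rw [ih]
        simp [pvContaining, hc', pvMisrec, hm']
        omega
    · rw [pvLoopA]
      simp only [hc, Bool.false_eq_true, if_false]
      rw [ih]
      have hc' : (decide (r.1.1 < x) && decide (x < r.1.2.2.1) && decide (r.1.2.1 < y) && decide (y < r.1.2.2.2)) = false := by
        simpa [gt_iff_lt] using hc
      simp [pvContaining, hc']

-- with identical accumulators the two outer loops coincide
theorem pvOuterA_eq (img : List ((Int × Int × Int × Int) × String × String)) (tsrs : List (Int × Int × Int × Int × String)) :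
    ∀ (good : List (Int × Int × Int × Int × String)) (misses bed : Int),
    pvOuterA img tsrs good misses bed = pvOuterB img tsrs good misses bed := by
  induction tsrs with
  | nil => intro good misses bed; simp [pvOuterA, pvOuterB]
  | cons s rest ih =>
    intro good misses bed
    rw [pvOuterA, pvLoopA_eq]
    rw [pvOuterB]
    simp only [Bool.true_and]
    exact ih _ _ _

-- ===== VERDICT (by name: the statement is the Claim_ definition above) =====
theorem check_detected_signs_spec : Claim_equal_check_detected_signs := by
  intro img tsr _
  unfold Spec_check_detected_signs check_detected_signs check_detected_signs_alt
  exact pvOuterA_eq img tsr [] 0 0
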